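-- pv_equiv track=rewrite | github.com/lehuuvinh92/Time-Series-Forecasting-using-Python | experiment1/cnn.py | create_data_ann
-- ===== SOURCE A (Python) =====
-- def create_data_ann(close_btc, lag):
--     btc_x = list()
--     btc_y = list()
--     for x in range(lag, len(close_btc)):
--         temp_x = list()
--         for i in range(x-lag, x):
--             temp_x.append(close_btc[i])
--         btc_x.append(temp_x)
--         btc_y.append(close_btc[x])
--     return btc_x, btc_y
-- ===== SOURCE B (Python) =====
-- def create_data_ann(close_btc, lag):
--     n = len(close_btc)
--     count = max(n - lag, 0)
--     width = lag if count > 0 else 0  # no columns are needed when there are no rows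
--     cols = [close_btc[i:i + count] for i in range(width)]
--     btc_x = [[col[j] for col in cols] for j in range(count)]
--     btc_y = close_btc[lag:]
--     return btc_x, btc_y
-- ===== Notes on version B (the rewrite author's own statement) =====
-- stated objective: alternative
-- what changed: Replaces the nested per-row index loop with a column-wise construction: lag shifted slices of length count = max(len-lag,0) are built once and transposed into the rows, and btc_y is taken as the single slice close_btc[lag:].
-- outside the precondition, e.g. on create_data_ann([1, 2], -1): A returns ([[], [], []], [2, 1, 2]), B returns ([[], [], []], [2])
import Mathlib
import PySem

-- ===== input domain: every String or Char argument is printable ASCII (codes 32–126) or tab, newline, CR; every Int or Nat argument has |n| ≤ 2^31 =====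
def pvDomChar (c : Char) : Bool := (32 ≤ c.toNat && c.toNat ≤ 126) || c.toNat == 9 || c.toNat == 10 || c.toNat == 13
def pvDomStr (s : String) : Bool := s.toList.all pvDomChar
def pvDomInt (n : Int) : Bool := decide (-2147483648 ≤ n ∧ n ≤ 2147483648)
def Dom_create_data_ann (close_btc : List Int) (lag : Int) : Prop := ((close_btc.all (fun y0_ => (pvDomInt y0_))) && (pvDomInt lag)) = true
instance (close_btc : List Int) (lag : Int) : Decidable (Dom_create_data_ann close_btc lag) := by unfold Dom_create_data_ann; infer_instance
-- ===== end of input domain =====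

-- B builds the lag feature matrix column-wise from shifted slices instead of A's nested index loop
-- (objective: alternative decomposition, same asymptotic cost).

-- ===== PORT A =====
-- pyGetD's default 0 is unreachable under Pre_ (with 0 ≤ lag every index A uses is in range).
def create_data_ann (close_btc : List Int) (lag : Int) : List (List Int) × List Int :=
  (PySem.List.pyRange lag (PySem.List.len close_btc)).foldl
    (fun (acc : List (List Int) × List Int) x =>
      let temp_x := (PySem.List.pyRange (x - lag) x).foldl
        (fun (t : List Int) i => t ++ [PySem.List.pyGetD close_btc i 0]) []
      (acc.1 ++ [temp_x], acc.2 ++ [PySem.List.pyGetD close_btc x 0]))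
    ([], [])

-- ===== PORT B =====
def create_data_ann_alt (close_btc : List Int) (lag : Int) : List (List Int) × List Int :=
  let n : Int := PySem.List.len close_btc
  let count : Int := max (n - lag) 0
  let width : Int := if 0 < count then lag else 0  -- no columns are needed when there are no rows
  let cols := (PySem.List.pyRange 0 width).map
    (fun i => PySem.List.slice close_btc (some i) (some (i + count)))
  let btc_x := (PySem.List.pyRange 0 count).map
    (fun j => cols.map (fun col => PySem.List.pyGetD col j 0))
  let btc_y := PySem.List.slice close_btc (some lag) none
  (btc_x, btc_y)

-- ===== PRECONDITION & SPEC =====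
-- Pre_ restricts to the natural domain lag ≥ 0: a negative lag is a nonsensical window size,
-- on which A either raises IndexError (lag < -len) or returns negative-index wraparound
-- artefacts (empty windows and a wrapped-around target list).
def Pre_create_data_ann (close_btc : List Int) (lag : Int) : Prop := 0 ≤ lag
instance (close_btc : List Int) (lag : Int) : Decidable (Pre_create_data_ann close_btc lag) := by unfold Pre_create_data_ann; infer_instance
def pvWitness_create_data_ann : List Int × Int := ([3, 1, 4, 1, 5], 2)
def Spec_create_data_ann (close_btc : List Int) (lag : Int) (out : List (List Int) × List Int) : Prop := out = create_data_ann_alt close_btc lag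
instance (close_btc : List Int) (lag : Int) (out : List (List Int) × List Int) : Decidable (Spec_create_data_ann close_btc lag out) := by unfold Spec_create_data_ann; infer_instance

-- ===== CLAIM (what is proved, stated in full; the proofs are below) =====
def Claim_equal_create_data_ann : Prop := ∀ (close_btc : List Int) (lag : Int), Dom_create_data_ann close_btc lag → Pre_create_data_ann close_btc lag → Spec_create_data_ann close_btc lag (create_data_ann close_btc lag)

-- ===== LEMMAS AND PROOFS =====

-- the common closed form: rows j = 0 .. len-lag-1, row j = window close_btc[j .. j+lag-1]
def pvRows (close_btc : List Int) (L : Nat) : List (List Int) :=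
  (List.range (close_btc.length - L)).map
    (fun j => (List.range L).map (fun i => close_btc.getD (j + i) 0))

lemma a_closed (close_btc : List Int) (lag : Int) (h : 0 ≤ lag) :
    create_data_ann close_btc lag =
      (pvRows close_btc lag.toNat, close_btc.drop lag.toNat) := by
  unfold create_data_ann
  simp only []
  rw [PySem.List.foldl_prod_mk
    (fun s x => s ++ [(PySem.List.pyRange (x - lag) x).foldl
        (fun (t : List Int) i => t ++ [PySem.List.pyGetD close_btc i 0]) []])
    (fun s x => s ++ [PySem.List.pyGetD close_btc x 0])]
  simp only [Prod.mk.injEq]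
  refine ⟨?_, ?_⟩
  · rw [PySem.List.foldl_append_singleton_eq_map]
    simp only [List.nil_append, PySem.List.len_eq]
    unfold pvRows
    rw [PySem.List.pyRange_one, List.map_map]
    have hlen : ((close_btc.length : Int) - lag).toNat = close_btc.length - lag.toNat := by omega
    rw [hlen]
    refine List.map_congr_left (fun k hk => ?_)
    simp only [Function.comp]
    rw [PySem.List.foldl_append_singleton_eq_map, List.nil_append]
    rw [PySem.List.pyRange_one]
    have h2 : lag + (k:Int) - lag = (k:Int) := by ring
    rw [h2]
    have h1 : (lag + (k:Int) - (k:Int)).toNat = lag.toNat := by omega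
    rw [h1, List.map_map]
    refine List.map_congr_left (fun i hi => ?_)
    simp only [Function.comp]
    rw [show (k:Int) + (i:Int) = ((k + i : Nat) : Int) by push_cast; ring,
      PySem.List.pyGetD_natCast]
  · rw [PySem.List.foldl_append_singleton_eq_map, List.nil_append,
      PySem.List.map_pyGetD_pyRange close_btc 0 h]

lemma b_closed (close_btc : List Int) (lag : Int) (h : 0 ≤ lag) :
    create_data_ann_alt close_btc lag =
      (pvRows close_btc lag.toNat, close_btc.drop lag.toNat) := by
  unfold create_data_ann_alt
  simp only [PySem.List.len_eq, Prod.mk.injEq]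
  refine ⟨?_, PySem.List.slice_from close_btc h⟩
  by_cases hc : 0 < max ((close_btc.length : Int) - lag) 0
  case neg =>
    rw [if_neg hc]
    have h0 : max ((close_btc.length : Int) - lag) 0 = 0 := by omega
    rw [h0]
    unfold pvRows
    rw [show close_btc.length - lag.toNat = 0 by omega]
    simp
  case pos =>
    rw [if_pos hc]
    have hcnat : (max ((close_btc.length : Int) - lag) 0).toNat
        = close_btc.length - lag.toNat := by omega
    rw [PySem.List.pyRange_one 0 (max ((close_btc.length : Int) - lag) 0),
      PySem.List.pyRange_one 0 lag]
    unfold pvRows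
    simp only [zero_add, sub_zero, List.map_map]
    rw [hcnat]
    refine List.map_congr_left (fun k hk => ?_)
    rw [List.mem_range] at hk
    refine List.map_congr_left (fun m hm => ?_)
    simp only [Function.comp_apply]
    rw [PySem.List.slice_toNat close_btc (by omega) (by omega)]
    have h3 : ((m : Int) + max ((close_btc.length : Int) - lag) 0).toNat - (m:Int).toNat
        = (max ((close_btc.length : Int) - lag) 0).toNat := by omega
    rw [h3, Int.toNat_natCast, PySem.List.pyGetD_natCast]
    rw [List.getD_eq_getElem?_getD, List.getD_eq_getElem?_getD,
      List.getElem?_take_of_lt (by omega), List.getElem?_drop]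
    rw [Nat.add_comm m k]

-- ===== VERDICT (by name: the statement is the Claim_ definition above) =====
theorem create_data_ann_spec : Claim_equal_create_data_ann := by
  intro close_btc lag _ hpre
  unfold Spec_create_data_ann
  rw [a_closed close_btc lag hpre, b_closed close_btc lag hpre]
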